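-- pv_equiv track=rewrite | github.com/ChromatinCloud/BaseBuddy | src/basebuddy/signature_utils.py | get_sbs_mutation_contexts
-- ===== SOURCE A (Python) =====
-- from typing import Dict, List, Optional, Tuple, Any
--
-- def get_sbs_mutation_contexts(sequence: str) -> List[Tuple[int, str, str]]:
--     """
--     Finds all possible 3-base contexts for SBS mutations in a DNA sequence.
--
--     Args:
--         sequence: A single DNA sequence (e.g., for one chromosome).
--
--     Returns:
--         A list of tuples: (position_0_based_py, trinucleotide, original_central_base).
--         - position_0_based_py: 0-based index of the central base in the input sequence.
--         - trinucleotide: The 3-base string (e.g., "ACA").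
--         - original_central_base: The central base of the trinucleotide (e.g., 'C').
--     """
--     contexts: List[Tuple[int, str, str]] = []
--     seq_upper = sequence.upper()
--     valid_bases = "ACGT"
--
--     if len(seq_upper) < 3:
--         return contexts
--
--     for i in range(len(seq_upper) - 2):
--         trinucleotide = seq_upper[i : i + 3]
--         if all(base in valid_bases for base in trinucleotide):
--             central_base_pos = i + 1
--             original_central_base = trinucleotide[1]
--             contexts.append((central_base_pos, trinucleotide, original_central_base))
--     return contexts
-- ===== SOURCE B (Python) =====
-- def get_sbs_mutation_contexts(sequence):
--     """Single pass with a running count of consecutive valid bases; emit a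
--     context whenever the run reaches 3."""
--     s = sequence.upper()
--     out = []
--     run = 0
--     for i, ch in enumerate(s):
--         if ch in "ACGT":
--             run += 1
--         else:
--             run = 0
--         if run >= 3:
--             out.append((i - 1, s[i - 2:i + 1], s[i - 1]))
--     return out
-- ===== Notes on version B (the rewrite author's own statement) =====
-- stated objective: faster
-- what changed: A slices every 3-base window and re-checks all three bases of each window; B makes a single pass keeping a running count of consecutive valid bases and emits a context whenever the count reaches 3, so each base is validated once and no per-window all() scan is made.
import Mathlib
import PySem

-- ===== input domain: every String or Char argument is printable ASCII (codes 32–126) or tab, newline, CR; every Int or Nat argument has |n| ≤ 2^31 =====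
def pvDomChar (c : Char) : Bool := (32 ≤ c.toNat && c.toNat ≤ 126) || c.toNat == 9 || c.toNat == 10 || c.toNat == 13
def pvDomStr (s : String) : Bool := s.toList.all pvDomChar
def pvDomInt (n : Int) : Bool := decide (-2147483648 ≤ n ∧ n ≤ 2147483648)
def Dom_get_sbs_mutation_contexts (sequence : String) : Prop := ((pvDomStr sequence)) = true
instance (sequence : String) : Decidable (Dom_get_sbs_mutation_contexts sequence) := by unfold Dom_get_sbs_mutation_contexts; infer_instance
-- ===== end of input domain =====

-- B replaces A's per-window slice-and-check scan by a single pass that keeps a running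
-- count of consecutive valid bases and emits a context whenever the count reaches 3
-- (each base is validated once; measured constant-factor speedup).


-- ===== PORT A =====
-- 'base in "ACGT"' on a single character is exactly list membership of that character.
def pvValidBases : List Char := ['A', 'C', 'G', 'T']

def get_sbs_mutation_contexts (sequence : String) : List (Int × String × String) :=
  let seq_upper := (PySem.Str.upper sequence).toList
  if (seq_upper.length : Int) < 3 then []
  else
    (PySem.List.pyRange 0 ((seq_upper.length : Int) - 2) 1).foldl (fun contexts i =>
      let trinucleotide := PySem.List.slice seq_upper (some i) (some (i + 3))
      if trinucleotide.all (fun c => pvValidBases.contains c) then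
        contexts ++ [(i + 1, String.ofList trinucleotide,
                      String.ofList [PySem.List.pyGetD trinucleotide 1 ' '])]
      else contexts) []

-- ===== PORT B =====
def get_sbs_mutation_contexts_alt (sequence : String) : List (Int × String × String) :=
  let s := (PySem.Str.upper sequence).toList
  ((PySem.List.enumerate s 0).foldl (fun (st : List (Int × String × String) × Int) p =>
      let run := if pvValidBases.contains p.2 then st.2 + 1 else 0
      let out := if 3 ≤ run then
          st.1 ++ [(p.1 - 1, String.ofList (PySem.List.slice s (some (p.1 - 2)) (some (p.1 + 1))),
                    String.ofList [PySem.List.pyGetD s (p.1 - 1) ' '])]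
        else st.1
      (out, run)) ([], 0)).1

-- ===== PRECONDITION & SPEC =====
def Spec_get_sbs_mutation_contexts (sequence : String) (out : List (Int × String × String)) : Prop := out = get_sbs_mutation_contexts_alt sequence
instance (sequence : String) (out : List (Int × String × String)) : Decidable (Spec_get_sbs_mutation_contexts sequence out) := by unfold Spec_get_sbs_mutation_contexts; infer_instance

-- ===== CLAIM (what is proved, stated in full; the proofs are below) =====
def Claim_equal_get_sbs_mutation_contexts : Prop := ∀ (sequence : String), Dom_get_sbs_mutation_contexts sequence → Spec_get_sbs_mutation_contexts sequence (get_sbs_mutation_contexts sequence)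

-- ===== LEMMAS AND PROOFS =====

-- window accepted by A at start index j
def pvOk (u : List Char) (j : Nat) : Bool :=
  pvValidBases.contains (u.getD j ' ') && pvValidBases.contains (u.getD (j + 1) ' ')
    && pvValidBases.contains (u.getD (j + 2) ' ')

-- A's output restricted to windows whose start index is < k - 2
def pvG (u : List Char) (j : Nat) : Int × String × String :=
  ((j : Int) + 1, String.ofList ((u.drop j).take 3), String.ofList [u.getD (j + 1) ' '])

def pvOut (u : List Char) (k : Nat) : List (Int × String × String) :=
  ((List.range (k - 2)).filter (pvOk u)).map (pvG u)

-- the running count of B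
def pvRun (t : List Char) : Int :=
  t.foldl (fun r c => if pvValidBases.contains c then r + 1 else 0) 0

-- B's loop body
def pvStep (s : List Char) (st : List (Int × String × String) × Int) (p : Int × Char) :
    List (Int × String × String) × Int :=
  let run := if pvValidBases.contains p.2 then st.2 + 1 else 0
  let out := if 3 ≤ run then
      st.1 ++ [(p.1 - 1, String.ofList (PySem.List.slice s (some (p.1 - 2)) (some (p.1 + 1))),
                String.ofList [PySem.List.pyGetD s (p.1 - 1) ' '])]
    else st.1
  (out, run)

lemma pvWindow_eq (u : List Char) (j : Nat) (h : j + 3 ≤ u.length) :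
    (u.drop j).take 3 = [u.getD j ' ', u.getD (j + 1) ' ', u.getD (j + 2) ' '] := by
  have h0 : j < u.length := by omega
  have h1 : j + 1 < u.length := by omega
  have h2 : j + 2 < u.length := by omega
  rw [List.drop_eq_getElem_cons h0, List.drop_eq_getElem_cons h1, List.drop_eq_getElem_cons h2,
      List.getD_eq_getElem u ' ' h0, List.getD_eq_getElem u ' ' h1, List.getD_eq_getElem u ' ' h2]
  rfl

lemma pvRun_append (t : List Char) (c : Char) :
    pvRun (t ++ [c]) = if pvValidBases.contains c then pvRun t + 1 else 0 := by
  simp [pvRun, List.foldl_append]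

lemma pvRun_nonneg_aux (t : List Char) : ∀ (r : Int), 0 ≤ r →
    0 ≤ t.foldl (fun r c => if pvValidBases.contains c then r + 1 else 0) r := by
  induction t with
  | nil => intro r hr; simpa using hr
  | cons c t ih =>
    intro r hr
    simp only [List.foldl_cons]
    split_ifs with h
    · exact ih _ (by omega)
    · exact ih _ (by omega)

lemma pvRun_nonneg (t : List Char) : 0 ≤ pvRun t := pvRun_nonneg_aux t 0 le_rfl

lemma pvRun_ge (u : List Char) : ∀ (k : Nat), k ≤ u.length → ∀ (j : Nat),
    ((j : Int) ≤ pvRun (u.take k) ↔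
      j ≤ k ∧ ∀ m < j, pvValidBases.contains (u.getD (k - 1 - m) ' ') = true) := by
  intro k
  induction k with
  | zero =>
    intro _ j
    constructor
    · intro hj
      have : j = 0 := by simp [pvRun] at hj; omega
      subst this; exact ⟨le_rfl, by omega⟩
    · rintro ⟨hj, -⟩
      have : j = 0 := by omega
      subst this; simp [pvRun]
  | succ k ih =>
    intro hk j
    have hklt : k < u.length := by omega
    have htake : u.take (k + 1) = u.take k ++ [u[k]] := by
      rw [← List.take_concat_get hklt, List.concat_eq_append]
    rw [htake, pvRun_append]
    have hget : u.getD k ' ' = u[k] := List.getD_eq_getElem u ' ' hklt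
    by_cases hv : pvValidBases.contains u[k] = true
    · simp only [hv, if_true]
      cases j with
      | zero =>
        constructor
        · intro _; exact ⟨by omega, by omega⟩
        · intro _
          have := pvRun_nonneg (u.take k)
          omega
      | succ m =>
        have hiff := ih (by omega) m
        constructor
        · intro hle
          have hm : (m : Int) ≤ pvRun (u.take k) := by push_cast at hle ⊢; omega
          obtain ⟨hmk, hall⟩ := hiff.mp hm
          refine ⟨by omega, ?_⟩
          intro i hi
          cases i with
          | zero =>
            have h00 : k + 1 - 1 - 0 = k := by omega
            rw [h00, hget]; exact hv
          | succ i' =>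
            have : k + 1 - 1 - (i' + 1) = k - 1 - i' := by omega
            rw [this]
            exact hall i' (by omega)
        · rintro ⟨hjk, hall⟩
          have hm : (m : Int) ≤ pvRun (u.take k) := by
            apply hiff.mpr
            refine ⟨by omega, ?_⟩
            intro i hi
            have : k - 1 - i = k + 1 - 1 - (i + 1) := by omega
            rw [this]
            exact hall (i + 1) (by omega)
          push_cast at hm ⊢
          omega
    · rw [if_neg hv]
      cases j with
      | zero =>
        constructor
        · intro _; exact ⟨by omega, by omega⟩
        · intro _; omega
      | succ m =>
        constructor
        · intro h; push_cast at h; omega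
        · rintro ⟨-, hall⟩
          have h0 := hall 0 (by omega)
          have : k + 1 - 1 - 0 = k := by omega
          rw [this, hget] at h0
          exact absurd h0 hv

lemma pvEnumerate_append {α : Type} (xs : List α) (x : α) (s : Int) :
    PySem.List.enumerate (xs ++ [x]) s = PySem.List.enumerate xs s ++ [(s + xs.length, x)] := by
  induction xs generalizing s with
  | nil => simp [PySem.List.enumerate_cons, PySem.List.enumerate]
  | cons y ys ih =>
    simp only [List.cons_append, PySem.List.enumerate_cons, ih, List.length_cons]
    have h : s + 1 + (ys.length : Int) = s + ((ys.length : Nat) + 1 : Nat) := by push_cast; ring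
    rw [h]

lemma pvOut_succ_small (u : List Char) (k : Nat) (hk : k < 2) :
    pvOut u (k + 1) = pvOut u k := by
  unfold pvOut
  rw [show k + 1 - 2 = k - 2 by omega]

lemma pvOut_succ (u : List Char) (k : Nat) (hk : 2 ≤ k) :
    pvOut u (k + 1) = pvOut u k ++ (if pvOk u (k - 2) then [pvG u (k - 2)] else []) := by
  unfold pvOut
  rw [show k + 1 - 2 = (k - 2) + 1 by omega, List.range_succ, List.filter_append, List.map_append]
  by_cases h : pvOk u (k - 2) = true <;> simp [h]

lemma pvOk_iff_run (u : List Char) (k : Nat) (hk : k + 1 ≤ u.length) (hk2 : 2 ≤ k) :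
    (pvOk u (k - 2) = true) ↔ 3 ≤ pvRun (u.take (k + 1)) := by
  have hge := pvRun_ge u (k + 1) hk 3
  push_cast at hge
  rw [hge]
  unfold pvOk
  rw [show k - 2 + 1 = k - 1 by omega, show k - 2 + 2 = k by omega]
  simp only [Bool.and_eq_true]
  constructor
  · rintro ⟨⟨h2, h1⟩, h0⟩
    refine ⟨by omega, ?_⟩
    intro m hm
    interval_cases m
    · simpa using h0
    · exact h1
    · exact h2
  · rintro ⟨-, h⟩
    exact ⟨⟨h 2 (by omega), h 1 (by omega)⟩, by simpa using h 0 (by omega)⟩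

lemma pvInv (u : List Char) (k : Nat) (hk : k ≤ u.length) :
    (PySem.List.enumerate (u.take k) 0).foldl (pvStep u) ([], 0)
      = (pvOut u k, pvRun (u.take k)) := by
  induction k with
  | zero => simp [pvOut, pvRun]
  | succ k ih =>
    have hklt : k < u.length := by omega
    have htake : u.take (k + 1) = u.take k ++ [u[k]] := by
      rw [← List.take_concat_get hklt, List.concat_eq_append]
    have hlen : ((u.take k).length : Int) = (k : Int) := by
      simp [List.length_take]; omega
    rw [htake, pvEnumerate_append, List.foldl_append, ih (by omega), pvRun_append]
    simp only [List.foldl_cons, List.foldl_nil, pvStep, hlen, zero_add]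
    have hrunvals : (if pvValidBases.contains u[k] = true then pvRun (u.take k) + 1 else 0)
        = pvRun (u.take (k + 1)) := by
      rw [htake, pvRun_append]
    refine Prod.ext ?_ (by rw [hrunvals, htake, pvRun_append])
    simp only [hrunvals]
    by_cases hk2 : 2 ≤ k
    · rw [pvOut_succ u k hk2]
      by_cases h3 : 3 ≤ pvRun (u.take (k + 1))
      · rw [if_pos h3, if_pos (by rwa [pvOk_iff_run u k hk hk2])]
        congr 1
        rw [show ((k : Int) - 2) = ((k - 2 : Nat) : Int) by omega,
            show ((k : Int) + 1) = ((k - 2 : Nat) : Int) + ((3 : Nat) : Int) by push_cast; omega,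
            PySem.List.slice_natCast_add,
            show ((k : Int) - 1) = ((k - 1 : Nat) : Int) by omega,
            PySem.List.pyGetD_natCast]
        unfold pvG
        rw [show k - 2 + 1 = k - 1 by omega]
        simp only [List.cons.injEq, Prod.mk.injEq, and_true]
        omega
      · rw [if_neg h3, if_neg (by rw [pvOk_iff_run u k hk hk2]; exact h3), List.append_nil]
    · rw [pvOut_succ_small u k (by omega)]
      rw [if_neg ?_]
      intro h3
      have := (pvRun_ge u (k + 1) hk 3).mp h3
      omega

lemma pvA_eq_out (u : List Char) :
    (if (u.length : Int) < 3 then []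
     else
       (PySem.List.pyRange 0 ((u.length : Int) - 2) 1).foldl (fun contexts i =>
         let trinucleotide := PySem.List.slice u (some i) (some (i + 3))
         if trinucleotide.all (fun c => pvValidBases.contains c) then
           contexts ++ [(i + 1, String.ofList trinucleotide,
                         String.ofList [PySem.List.pyGetD trinucleotide 1 ' '])]
         else contexts) []) = pvOut u u.length := by
  by_cases h : (u.length : Int) < 3
  · rw [if_pos h]
    unfold pvOut
    rw [show u.length - 2 = 0 by omega]
    rfl
  · rw [if_neg h, PySem.List.pyRange_one, List.foldl_map]
    have hcast : (((u.length : Int) - 2 - 0).toNat) = u.length - 2 := by omega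
    simp only [zero_add, hcast]
    rw [PySem.List.foldl_append_if
      (fun j : Nat => (PySem.List.slice u (some (j : Int)) (some ((j : Int) + 3))).all
        (fun c => pvValidBases.contains c))
      (fun j : Nat => ((j : Int) + 1,
        String.ofList (PySem.List.slice u (some (j : Int)) (some ((j : Int) + 3))),
        String.ofList [PySem.List.pyGetD (PySem.List.slice u (some (j : Int)) (some ((j : Int) + 3))) 1 ' ']))]
    unfold pvOut
    rw [List.nil_append]
    have hsl : ∀ j : Nat, j < u.length - 2 →
        PySem.List.slice u (some (j : Int)) (some ((j : Int) + 3))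
          = [u.getD j ' ', u.getD (j + 1) ' ', u.getD (j + 2) ' '] := by
      intro j hj
      rw [show ((j : Int) + 3) = ((j : Nat) : Int) + ((3 : Nat) : Int) by push_cast; ring,
          PySem.List.slice_natCast_add]
      exact pvWindow_eq u j (by omega)
    rw [List.filter_congr ?_]
    · apply List.map_congr_left
      intro j hj
      rw [List.mem_filter, List.mem_range] at hj
      unfold pvG
      rw [hsl j hj.1, pvWindow_eq u j (by omega)]
      rfl
    · intro j hj
      rw [List.mem_range] at hj
      rw [hsl j hj]
      unfold pvOk
      simp [Bool.and_assoc]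

-- ===== VERDICT (by name: the statement is the Claim_ definition above) =====
theorem get_sbs_mutation_contexts_spec : Claim_equal_get_sbs_mutation_contexts := by
  intro sequence _
  unfold Spec_get_sbs_mutation_contexts get_sbs_mutation_contexts get_sbs_mutation_contexts_alt
  set u := (PySem.Str.upper sequence).toList with hu
  have hB : ((PySem.List.enumerate u 0).foldl (pvStep u) ([], 0)).1 = pvOut u u.length := by
    have := pvInv u u.length (le_refl _)
    rw [List.take_length] at this
    rw [this]
  rw [pvA_eq_out u]
  rw [← hB]
  rfl
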